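-- pv_equiv track=rewrite | github.com/khoj-ai/timely | datasetgen2 copy.py | contains_four_digit_year
-- ===== SOURCE A (Python) =====
-- def contains_four_digit_year(text):
--     for i in range(len(text) - 3):
--         if text[i:i+4].isdigit():
--             if i == 0 or not text[i-1].isdigit():
--                 if i+4 == len(text) or not text[i+4].isdigit():
--                     # Check if it's surrounded by spaces or common punctuation
--                     if i == 0 or text[i-1] in ' ,.?':
--                         if i+4 == len(text) or text[i+4] in ' ,.?':
--                             return True
--     return False
-- ===== SOURCE B (Python) =====
-- def contains_four_digit_year(text):
--     # Tokenize on the delimiter characters ' ,.?', then look for a 4-digit token.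
--     tokens = []
--     cur = ''
--     for ch in text:
--         if ch in ' ,.?':
--             tokens.append(cur)
--             cur = ''
--         else:
--             cur += ch
--     tokens.append(cur)
--     return any(len(t) == 4 and t.isdigit() for t in tokens)
-- ===== Notes on version B (the rewrite author's own statement) =====
-- stated objective: simpler
-- what changed: Replaces A's sliding 4-character window with five nested boundary checks per position by a single tokenize-on-delimiters pass followed by a scan for a token of length 4 that is all digits.
import Mathlib
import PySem

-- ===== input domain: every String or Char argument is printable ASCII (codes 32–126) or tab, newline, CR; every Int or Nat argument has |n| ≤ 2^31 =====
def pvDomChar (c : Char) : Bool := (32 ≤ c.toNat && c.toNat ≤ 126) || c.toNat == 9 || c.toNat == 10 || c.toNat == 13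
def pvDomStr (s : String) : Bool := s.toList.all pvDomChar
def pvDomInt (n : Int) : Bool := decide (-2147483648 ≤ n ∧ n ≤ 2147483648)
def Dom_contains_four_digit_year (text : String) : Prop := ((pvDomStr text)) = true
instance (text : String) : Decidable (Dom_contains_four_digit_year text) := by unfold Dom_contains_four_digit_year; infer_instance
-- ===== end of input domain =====

-- B replaces A's sliding 4-character window with per-position boundary checks by a
-- tokenize-on-' ,.?' pass followed by a scan for a token of length 4 that is all digits (objective: simpler).


-- ===== PORT A =====
-- the Python string ' ,.?' used in both versions' 'in' membership tests, as its character list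
def pyDelims : List Char := [' ', ',', '.', '?']

-- literal port of A: for i in range(len(text) - 3): five nested ifs with an early 'return True' ⇒ List.any;
-- text[i-1] / text[i+4] are in range at every evaluated use, so '(pyGet? …).getD' never takes its default
def contains_four_digit_year (text : String) : Bool :=
  let cs := text.toList
  let n : Int := cs.length
  (PySem.List.pyRange 0 (n - 3) 1).any (fun i =>
    PySem.Chars.strIsdigit (PySem.List.slice cs (some i) (some (i + 4))) &&
    (i == 0 || !(PySem.Chars.isdigit ((PySem.List.pyGet? cs (i - 1)).getD ' '))) &&
    (i + 4 == n || !(PySem.Chars.isdigit ((PySem.List.pyGet? cs (i + 4)).getD ' '))) &&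
    (i == 0 || pyDelims.contains ((PySem.List.pyGet? cs (i - 1)).getD ' ')) &&
    (i + 4 == n || pyDelims.contains ((PySem.List.pyGet? cs (i + 4)).getD ' ')))

-- ===== PORT B =====
-- literal port of Source B: one fold building (closed tokens, current token), then scan the token list
def contains_four_digit_year_alt (text : String) : Bool :=
  let st := text.toList.foldl
    (fun (acc : List (List Char) × List Char) ch =>
      if pyDelims.contains ch then (acc.1 ++ [acc.2], []) else (acc.1, acc.2 ++ [ch]))
    ([], [])
  (st.1 ++ [st.2]).any (fun t => t.length == 4 && PySem.Chars.strIsdigit t)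

-- ===== PRECONDITION & SPEC =====
def Spec_contains_four_digit_year (text : String) (out : Bool) : Prop := out = contains_four_digit_year_alt text
instance (text : String) (out : Bool) : Decidable (Spec_contains_four_digit_year text out) := by unfold Spec_contains_four_digit_year; infer_instance

-- ===== CLAIM (what is proved, stated in full; the proofs are below) =====
def Claim_equal_contains_four_digit_year : Prop := ∀ (text : String), Dom_contains_four_digit_year text → Spec_contains_four_digit_year text (contains_four_digit_year text)

-- ===== LEMMAS AND PROOFS =====

-- the recursive splitter: proof-side mirror of B's token-building fold
def pvSplit : List Char → List (List Char)
  | [] => [[]]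
  | c :: cs =>
    if pyDelims.contains c then [] :: pvSplit cs
    else match pvSplit cs with
      | [] => [[c]]
      | t :: ts => (c :: t) :: ts

-- boundary conditions of a token occurrence
def pvBndR (suf : List Char) : Prop := suf = [] ∨ ∃ d s', suf = d :: s' ∧ pyDelims.contains d = true
def pvBndL (pre : List Char) : Prop := pre = [] ∨ ∃ p' d, pre = p' ++ [d] ∧ pyDelims.contains d = true

-- the common specification: a standalone run of exactly four digits
def pvSpecY (cs : List Char) : Prop :=
  ∃ pre t suf, cs = pre ++ t ++ suf ∧ t.length = 4 ∧
    (∀ c ∈ t, PySem.Chars.isdigit c = true) ∧ pvBndL pre ∧ pvBndR suf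

theorem pvSplit_ne_nil (cs : List Char) : pvSplit cs ≠ [] := by
  cases cs with
  | nil => simp [pvSplit]
  | cons c cs =>
    simp only [pvSplit]
    split
    · simp
    · split <;> simp

theorem fold_eq_pvSplit (cs : List Char) (ts : List (List Char)) (cur : List Char) :
    (cs.foldl
      (fun (acc : List (List Char) × List Char) ch =>
        if pyDelims.contains ch then (acc.1 ++ [acc.2], []) else (acc.1, acc.2 ++ [ch]))
      (ts, cur)).1
    ++ [(cs.foldl
      (fun (acc : List (List Char) × List Char) ch =>
        if pyDelims.contains ch then (acc.1 ++ [acc.2], []) else (acc.1, acc.2 ++ [ch]))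
      (ts, cur)).2] = ts ++ (pvSplit cs).modifyHead (cur ++ ·) := by
  induction cs generalizing ts cur with
  | nil => simp [pvSplit]
  | cons c cs ih =>
    simp only [List.foldl_cons, pvSplit]
    by_cases h : pyDelims.contains c
    · simp only [h, if_pos]
      rw [ih]
      cases pvSplit cs <;> simp
    · simp only [h, if_neg, Bool.false_eq_true, not_false_iff]
      rw [ih]
      rcases hsp : pvSplit cs with _ | ⟨t, ts'⟩
      · exact absurd hsp (pvSplit_ne_nil cs)
      · simp

theorem pvSplit_append_delim (xs ys : List Char) (d : Char) (hd : pyDelims.contains d = true) :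
    pvSplit (xs ++ d :: ys) = pvSplit xs ++ pvSplit ys := by
  induction xs with
  | nil =>
    simp only [List.nil_append, pvSplit, hd, if_true]
    rfl
  | cons c xs ih =>
    simp only [List.cons_append, pvSplit, ih]
    by_cases h : pyDelims.contains c
    · simp only [h, if_true, List.cons_append]
    · simp only [h, Bool.false_eq_true, if_neg, not_false_iff]
      rcases hsp : pvSplit xs with _ | ⟨t, ts'⟩
      · exact absurd hsp (pvSplit_ne_nil xs)
      · simp

theorem pvSplit_noDelim (xs : List Char) (h : ∀ c ∈ xs, pyDelims.contains c = false) :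
    pvSplit xs = [xs] := by
  induction xs with
  | nil => rfl
  | cons c xs ih =>
    simp only [pvSplit, h c (List.mem_cons_self ..), Bool.false_eq_true, if_neg, not_false_iff]
    rw [ih (fun c hc => h c (List.mem_cons_of_mem _ hc))]

theorem pvSplit_head (cs : List Char) :
    ∃ suf, cs = (pvSplit cs).headI ++ suf ∧ pvBndR suf := by
  induction cs with
  | nil => exact ⟨[], by simp [pvSplit], Or.inl rfl⟩
  | cons c cs ih =>
    by_cases h : pyDelims.contains c
    · refine ⟨c :: cs, ?_, Or.inr ⟨c, cs, rfl, h⟩⟩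
      have h' : c ∈ pyDelims := by simpa using h
      simp [pvSplit, h']
    · obtain ⟨suf, heq, hb⟩ := ih
      refine ⟨suf, ?_, hb⟩
      simp only [pvSplit, h, Bool.false_eq_true, if_neg, not_false_iff]
      rcases hsp : pvSplit cs with _ | ⟨t, ts'⟩
      · exact absurd hsp (pvSplit_ne_nil cs)
      · rw [hsp] at heq
        simp only [List.headI] at heq ⊢
        rw [List.cons_append, ← heq]

theorem pvSplit_tail_mem (cs t : List Char) (h : t ∈ (pvSplit cs).tail) :
    ∃ pre suf, cs = pre ++ t ++ suf ∧ (∃ p' d, pre = p' ++ [d] ∧ pyDelims.contains d = true) ∧ pvBndR suf := by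
  induction cs with
  | nil => simp [pvSplit] at h
  | cons c cs ih =>
    by_cases hc : pyDelims.contains c
    · simp only [pvSplit, hc, if_true, List.tail_cons] at h
      rcases hsp : pvSplit cs with _ | ⟨t0, ts⟩
      · exact absurd hsp (pvSplit_ne_nil cs)
      · rw [hsp] at h
        rcases List.mem_cons.1 h with rfl | htl
        · obtain ⟨suf, heq, hb⟩ := pvSplit_head cs
          rw [hsp] at heq; simp only [List.headI] at heq
          exact ⟨[c], suf, by simp [heq], ⟨[], c, rfl, hc⟩, hb⟩
        · obtain ⟨pre, suf, heq, ⟨p', d, hpre, hd⟩, hb⟩ := ih (by rw [hsp]; exact htl)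
          exact ⟨c :: pre, suf, by simp [heq], ⟨c :: p', d, by simp [hpre], hd⟩, hb⟩
    · simp only [pvSplit, hc, Bool.false_eq_true, if_neg, not_false_iff] at h
      rcases hsp : pvSplit cs with _ | ⟨t0, ts⟩
      · exact absurd hsp (pvSplit_ne_nil cs)
      · rw [hsp] at h
        simp only [List.tail_cons] at h
        obtain ⟨pre, suf, heq, ⟨p', d, hpre, hd⟩, hb⟩ := ih (by rw [hsp]; exact h)
        refine ⟨c :: pre, suf, by simp [heq], ⟨c :: p', d, by simp [hpre], hd⟩, hb⟩

theorem delim_not_digit (d : Char) (hd : pyDelims.contains d = true) :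
    PySem.Chars.isdigit d = false := by
  have hm : d ∈ pyDelims := by simpa using hd
  fin_cases hm <;> decide

theorem digit_not_delim (c : Char) (hc : PySem.Chars.isdigit c = true) :
    pyDelims.contains c = false := by
  by_contra h
  have := delim_not_digit c (by simpa using h)
  rw [hc] at this; simp at this

theorem alt_eq_any (text : String) :
    contains_four_digit_year_alt text
      = (pvSplit text.toList).any (fun t => t.length == 4 && PySem.Chars.strIsdigit t) := by
  simp only [contains_four_digit_year_alt]
  rw [fold_eq_pvSplit]
  cases hsp : pvSplit text.toList with
  | nil => exact absurd hsp (pvSplit_ne_nil _)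
  | cons t ts => simp

theorem tok_mem_of_bndR (t suf : List Char) (ht : ∀ c ∈ t, PySem.Chars.isdigit c = true)
    (hb : pvBndR suf) : t ∈ pvSplit (t ++ suf) := by
  have hnd : ∀ c ∈ t, pyDelims.contains c = false := fun c hc => digit_not_delim c (ht c hc)
  rcases hb with rfl | ⟨d, s', rfl, hd⟩
  · rw [List.append_nil, pvSplit_noDelim t hnd]; exact List.mem_singleton.2 rfl
  · rw [pvSplit_append_delim t s' d hd, pvSplit_noDelim t hnd]
    exact List.mem_append_left _ (List.mem_singleton.2 rfl)

theorem alt_iff (text : String) : contains_four_digit_year_alt text = true ↔ pvSpecY text.toList := by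
  rw [alt_eq_any]
  rw [List.any_eq_true]
  constructor
  · rintro ⟨t, hmem, hP⟩
    have hP' : t.length = 4 ∧ (∀ c ∈ t, PySem.Chars.isdigit c = true) := by
      simp only [Bool.and_eq_true, beq_iff_eq, PySem.Chars.strIsdigit, List.all_eq_true] at hP
      exact ⟨hP.1, hP.2.2⟩
    rcases hsp : pvSplit text.toList with _ | ⟨t0, ts⟩
    · exact absurd hsp (pvSplit_ne_nil _)
    · rw [hsp] at hmem
      rcases List.mem_cons.1 hmem with rfl | htl
      · obtain ⟨suf, heq, hb⟩ := pvSplit_head text.toList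
        rw [hsp] at heq; simp only [List.headI] at heq
        exact ⟨[], t, suf, by simpa using heq, hP'.1, hP'.2, Or.inl rfl, hb⟩
      · obtain ⟨pre, suf, heq, hL, hb⟩ := pvSplit_tail_mem text.toList t (by rw [hsp]; exact htl)
        exact ⟨pre, t, suf, heq, hP'.1, hP'.2, Or.inr hL, hb⟩
  · rintro ⟨pre, t, suf, heq, hlen, hdig, hL, hR⟩
    refine ⟨t, ?_, ?_⟩
    · rcases hL with rfl | ⟨p', d, rfl, hd⟩
      · rw [heq, List.nil_append]; exact tok_mem_of_bndR t suf hdig hR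
      · have hre : p' ++ [d] ++ t ++ suf = p' ++ d :: (t ++ suf) := by simp
        rw [heq, hre, pvSplit_append_delim p' (t ++ suf) d hd]
        exact List.mem_append_right _ (tok_mem_of_bndR t suf hdig hR)
    · simp only [Bool.and_eq_true, beq_iff_eq, PySem.Chars.strIsdigit, List.all_eq_true,
        Bool.not_eq_true', List.isEmpty_eq_false_iff, ne_eq]
      refine ⟨hlen, ?_, hdig⟩
      intro h; rw [h] at hlen; simp at hlen

theorem a_iff (text : String) : contains_four_digit_year text = true ↔ pvSpecY text.toList := by
  simp only [contains_four_digit_year, List.any_eq_true]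
  set cs := text.toList with hcs
  constructor
  · rintro ⟨i, hi, hcond⟩
    rw [PySem.List.mem_pyRange_one] at hi
    obtain ⟨k, rfl⟩ : ∃ k : ℕ, i = (k : Int) := ⟨i.toNat, (Int.toNat_of_nonneg hi.1).symm⟩
    have hk4 : k + 4 ≤ cs.length := by omega
    have hslice : PySem.List.slice cs (some (k : Int)) (some ((k : Int) + 4))
        = (cs.drop k).take 4 := by
      have h4 : ((k : Int) + 4) = ((k : Int) + ((4 : ℕ) : Int)) := by norm_num
      rw [h4, PySem.List.slice_natCast_add]
    rw [hslice] at hcond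
    simp only [Bool.and_eq_true, Bool.or_eq_true, beq_iff_eq, Bool.not_eq_true',
      PySem.Chars.strIsdigit, List.all_eq_true, Bool.not_eq_true',
      List.isEmpty_eq_false_iff] at hcond
    obtain ⟨⟨⟨⟨⟨hne, hdig⟩, _⟩, _⟩, hA4⟩, hA5⟩ := hcond
    refine ⟨cs.take k, (cs.drop k).take 4, cs.drop (k + 4), ?_, ?_, hdig, ?_, ?_⟩
    · have hdd : List.drop (k + 4) cs = List.drop 4 (List.drop k cs) := by
        rw [List.drop_drop]
      rw [List.append_assoc, hdd]
      conv_lhs => rw [← List.take_append_drop k cs, ← List.take_append_drop 4 (List.drop k cs)]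
    · simp; omega
    · by_cases hk0 : k = 0
      · subst hk0; exact Or.inl (by simp)
      · rcases hA4 with h0 | hcont
        · exact absurd (by exact_mod_cast h0) hk0
        · have hk1 : 1 ≤ k := Nat.one_le_iff_ne_zero.2 hk0
          have hidx : ((k : Int) - 1) = (((k - 1 : ℕ) : Int)) := by omega
          rw [hidx, PySem.List.pyGet?_natCast] at hcont
          have hlt : k - 1 < cs.length := by omega
          rw [List.getElem?_eq_getElem hlt] at hcont
          simp only [Option.getD_some] at hcont
          refine Or.inr ⟨cs.take (k - 1), cs[k - 1], ?_, hcont⟩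
          have htk := List.take_add_one (i := k - 1) (l := cs)
          rw [List.getElem?_eq_getElem hlt] at htk
          have hk : k - 1 + 1 = k := by omega
          rw [hk] at htk
          simpa using htk
    · by_cases hke : k + 4 = cs.length
      · exact Or.inl (by rw [hke, List.drop_length])
      · rcases hA5 with hn | hcont
        · exact absurd (by exact_mod_cast hn) hke
        · have hlt : k + 4 < cs.length := by omega
          have hidx : ((k : Int) + 4) = (((k + 4 : ℕ) : Int)) := by omega
          rw [hidx, PySem.List.pyGet?_natCast, List.getElem?_eq_getElem hlt] at hcont
          simp only [Option.getD_some] at hcont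
          refine Or.inr ⟨cs[k + 4], cs.drop (k + 5), ?_, hcont⟩
          rw [List.drop_eq_getElem_cons hlt]
  · rintro ⟨pre, t, suf, heq, hlen, hdig, hL, hR⟩
    have hn : cs.length = pre.length + 4 + suf.length := by
      rw [heq]; simp [hlen]; omega
    refine ⟨(pre.length : Int), ?_, ?_⟩
    · rw [PySem.List.mem_pyRange_one]
      constructor
      · positivity
      · omega
    · have hdrop : cs.drop pre.length = t ++ suf := by
        rw [heq]
        simp only [List.append_assoc]
        exact List.drop_left
      have hslice : PySem.List.slice cs (some (pre.length : Int)) (some ((pre.length : Int) + 4))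
          = t := by
        have h4 : ((pre.length : Int) + 4) = ((pre.length : Int) + ((4 : ℕ) : Int)) := by norm_num
        rw [h4, PySem.List.slice_natCast_add, hdrop, List.take_left' hlen]
      rw [hslice]
      simp only [Bool.and_eq_true, Bool.or_eq_true, beq_iff_eq, Bool.not_eq_true',
        PySem.Chars.strIsdigit, List.all_eq_true, Bool.not_eq_true',
        List.isEmpty_eq_false_iff]
      have hget1 : pre ≠ [] → ∀ p' d, pre = p' ++ [d] →
          ((PySem.List.pyGet? cs ((pre.length : Int) - 1)).getD ' ') = d := by
        rintro _ p' d rfl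
        have hidx : ((p' ++ [d]).length : Int) - 1 = ((p'.length : ℕ) : Int) := by
          simp
        rw [hidx, PySem.List.pyGet?_natCast, heq]
        simp only [List.append_assoc, List.singleton_append]
        rw [List.getElem?_append_right (le_refl _)]
        simp
      have hget2 : ∀ d s', suf = d :: s' →
          ((PySem.List.pyGet? cs ((pre.length : Int) + 4)).getD ' ') = d := by
        rintro d s' rfl
        have hidx : ((pre.length : Int)) + 4 = (((pre.length + 4 : ℕ)) : Int) := by omega
        rw [hidx, PySem.List.pyGet?_natCast, heq]
        rw [List.getElem?_append_right (by simp [hlen])]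
        simp [hlen]
      refine ⟨⟨⟨⟨⟨?_, hdig⟩, ?_⟩, ?_⟩, ?_⟩, ?_⟩
      · intro h; rw [h] at hlen; simp at hlen
      · rcases hL with rfl | ⟨p', d, hpre, hd⟩
        · exact Or.inl rfl
        · exact Or.inr (by rw [hget1 (by simp [hpre]) p' d hpre]; exact delim_not_digit d hd)
      · rcases hR with rfl | ⟨d, s', hsuf, hd⟩
        · exact Or.inl (by simp at hn; omega)
        · exact Or.inr (by rw [hget2 d s' hsuf]; exact delim_not_digit d hd)
      · rcases hL with rfl | ⟨p', d, hpre, hd⟩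
        · exact Or.inl rfl
        · exact Or.inr (by rw [hget1 (by simp [hpre]) p' d hpre]; exact hd)
      · rcases hR with rfl | ⟨d, s', hsuf, hd⟩
        · exact Or.inl (by simp at hn; omega)
        · exact Or.inr (by rw [hget2 d s' hsuf]; exact hd)

-- ===== VERDICT (by name: the statement is the Claim_ definition above) =====
theorem contains_four_digit_year_spec : Claim_equal_contains_four_digit_year := by
  intro text _
  unfold Spec_contains_four_digit_year
  by_cases hA : contains_four_digit_year text = true
  · rw [hA, ((alt_iff text).2 ((a_iff text).1 hA)).symm]
  · have hA' : contains_four_digit_year text = false := by simpa using hA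
    have hB : contains_four_digit_year_alt text = false := by
      by_contra hb
      exact hA ((a_iff text).2 ((alt_iff text).1 (by simpa using hb)))
    rw [hA', hB]
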